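-- pv_equiv track=rewrite | github.com/bonetblai/np2pddl | trunk/tool/instance_predicates.py | generate_suc
-- ===== SOURCE A (Python) =====
-- def generate_suc(n):
--     if n < 2:
--         raise ValueError
--     if n == 2:
--         return ["(suc zero max)"]
--
--     s = ["(suc zero obj1)"]
--     for i in range(1, n-2):
--         s.append("(suc obj" + str(i) + " obj" + str(i+1) + ")")
--     s.append("(suc obj" + str(n-2) + " max)")
--     return s
-- ===== SOURCE B (Python) =====
-- def generate_suc(n):
--     if n < 2:
--         raise ValueError
--     names = ["zero"] + ["obj" + str(i) for i in range(1, n - 1)] + ["max"]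
--     return ["(suc " + a + " " + b + ")" for a, b in zip(names, names[1:])]
-- ===== Notes on version B (the rewrite author's own statement) =====
-- stated objective: simpler
-- what changed: B replaces A's special n==2 branch plus index loop by building the ordered node-name list once and zipping consecutive pairs into '(suc a b)' strings.
-- outside the precondition, e.g. on generate_suc(1): A raises ValueError, B raises ValueError
import Mathlib
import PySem

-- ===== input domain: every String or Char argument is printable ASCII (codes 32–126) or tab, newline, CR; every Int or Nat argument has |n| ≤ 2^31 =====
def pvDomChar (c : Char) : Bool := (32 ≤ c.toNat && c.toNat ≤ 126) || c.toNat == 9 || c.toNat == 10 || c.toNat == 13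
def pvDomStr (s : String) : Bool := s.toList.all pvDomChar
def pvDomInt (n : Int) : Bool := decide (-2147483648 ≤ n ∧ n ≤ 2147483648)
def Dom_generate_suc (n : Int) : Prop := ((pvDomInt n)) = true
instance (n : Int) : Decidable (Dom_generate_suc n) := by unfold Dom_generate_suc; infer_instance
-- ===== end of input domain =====

-- B is simpler: it builds the ordered node-name list once and zips consecutive pairs (no n==2 special case).

-- ===== PORT A =====
def generate_suc (n : Int) : List String :=
  if n < 2 then []  -- unreachable under Pre_ (Python raises ValueError here)
  else if n = 2 then ["(suc zero max)"]
  else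
    (((PySem.List.pyRange 1 (n-2) 1).foldl
      (fun acc i => acc.push ("(suc obj" ++ PySem.Int.toStr i ++ " obj" ++ PySem.Int.toStr (i+1) ++ ")"))
      #["(suc zero obj1)"]).push ("(suc obj" ++ PySem.Int.toStr (n-2) ++ " max)")).toList

-- ===== PORT B =====
-- names = ["zero"] + ["obj"+str(i) for i in range(1, n-1)] + ["max"]
def pvNames (n : Int) : List String :=
  "zero" :: ((PySem.List.pyRange 1 (n-1) 1).map (fun i => "obj" ++ PySem.Int.toStr i)) ++ ["max"]

def generate_suc_alt (n : Int) : List String :=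
  if n < 2 then []  -- unreachable under Pre_ (Python raises ValueError here)
  else List.zipWith (fun a b => "(suc " ++ a ++ " " ++ b ++ ")") (pvNames n) ((pvNames n).drop 1)

-- ===== PRECONDITION & SPEC =====
-- Pre_ excludes exactly n < 2, where Python A raises ValueError (B raises it too).
def Pre_generate_suc (n : Int) : Prop := 2 ≤ n
instance (n : Int) : Decidable (Pre_generate_suc n) := by unfold Pre_generate_suc; infer_instance
def pvWitness_generate_suc : Int := (5)

def Spec_generate_suc (n : Int) (out : List String) : Prop := out = generate_suc_alt n
instance (n : Int) (out : List String) : Decidable (Spec_generate_suc n out) := by unfold Spec_generate_suc; infer_instance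

-- ===== CLAIM =====
def Claim_equal_generate_suc : Prop := ∀ (n : Int), Dom_generate_suc n → Pre_generate_suc n → Spec_generate_suc n (generate_suc n)

-- ===== LEMMAS AND PROOFS =====

-- common shape: the successor pairs starting at obj a, with m intermediate links, ending at max
def pvA (m : Nat) (a : Int) : List String :=
  match m with
  | 0 => ["(suc obj" ++ PySem.Int.toStr a ++ " max)"]
  | Nat.succ m =>
      ("(suc obj" ++ PySem.Int.toStr a ++ " obj" ++ PySem.Int.toStr (a+1) ++ ")") :: pvA m (a+1)

lemma pv_pf_nm (x y : String) :
    "(suc " ++ ("obj" ++ x) ++ " " ++ ("obj" ++ y) ++ ")" = "(suc obj" ++ x ++ " obj" ++ y ++ ")" := by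
  apply String.ext; simp

lemma pv_pf_max (x : String) :
    "(suc " ++ ("obj" ++ x) ++ " " ++ "max" ++ ")" = "(suc obj" ++ x ++ " max)" := by
  apply String.ext; simp

-- a Python list grown by append is an Array; bridge its foldl to the List form
lemma pv_arr (g : Int → String) (l : List Int) : ∀ (a : Array String),
    (l.foldl (fun acc i => acc.push (g i)) a).toList = l.foldl (fun acc i => acc ++ [g i]) a.toList := by
  induction l with
  | nil => intro a; simp
  | cons x t ih => intro a; rw [List.foldl_cons, List.foldl_cons, ih (a.push (g x)), Array.toList_push]

lemma pv_tl : (#["(suc zero obj1)"] : Array String).toList = ["(suc zero obj1)"] := rfl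

lemma pv_LA (m : Nat) : ∀ (a : Int) (s : List String),
    (PySem.List.pyRange a (a + (m : Int)) 1).foldl
        (fun acc i => acc ++ ["(suc obj" ++ PySem.Int.toStr i ++ " obj" ++ PySem.Int.toStr (i+1) ++ ")"]) s
      ++ ["(suc obj" ++ PySem.Int.toStr (a + (m : Int)) ++ " max)"]
    = s ++ pvA m a := by
  induction m with
  | zero =>
      intro a s
      rw [PySem.List.pyRange_one_eq_nil (by omega)]
      simp [pvA]
  | succ m ih =>
      intro a s
      rw [PySem.List.pyRange_one_cons (by omega)]
      have hb : a + ((m + 1 : Nat) : Int) = (a + 1) + (m : Int) := by push_cast; ring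
      rw [hb, List.foldl_cons, ih (a + 1) (s ++ _)]
      simp [pvA]

lemma pv_LB (m : Nat) : ∀ (a : Int),
    List.zipWith (fun x y => "(suc " ++ x ++ " " ++ y ++ ")")
      (("obj" ++ PySem.Int.toStr a) ::
        ((PySem.List.pyRange (a+1) (a+1+(m : Int)) 1).map (fun i => "obj" ++ PySem.Int.toStr i) ++ ["max"]))
      ((PySem.List.pyRange (a+1) (a+1+(m : Int)) 1).map (fun i => "obj" ++ PySem.Int.toStr i) ++ ["max"])
    = pvA m a := by
  induction m with
  | zero =>
      intro a
      rw [PySem.List.pyRange_one_eq_nil (by omega)]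
      simpa [pvA] using pv_pf_max (PySem.Int.toStr a)
  | succ m ih =>
      intro a
      rw [PySem.List.pyRange_one_cons (by omega)]
      have hb : a + 1 + ((m + 1 : Nat) : Int) = (a + 1) + 1 + (m : Int) := by push_cast; ring
      rw [hb, List.map_cons]
      simp only [List.cons_append, List.zipWith_cons_cons]
      rw [ih (a + 1), pv_pf_nm]
      rfl

lemma pv_main (n : Int) (h : 2 ≤ n) : generate_suc n = generate_suc_alt n := by
  rcases eq_or_lt_of_le h with h2 | h3
  · rw [← h2]; decide
  · have hn2 : ¬ n < 2 := by omega
    have hne2 : ¬ n = 2 := by omega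
    unfold generate_suc generate_suc_alt pvNames
    rw [if_neg hn2, if_neg hne2, if_neg hn2]
    have e1 : n - 2 = 1 + (((n - 3).toNat : Nat) : Int) := by omega
    have e2 : n - 1 = 1 + 1 + (((n - 3).toNat : Nat) : Int) := by omega
    rw [Array.toList_push, pv_arr, pv_tl]
    rw [e1, e2]
    rw [pv_LA ((n - 3).toNat) 1]
    rw [PySem.List.pyRange_one_cons (by omega), List.map_cons]
    simp only [List.cons_append, List.drop_succ_cons, List.drop_zero, List.zipWith_cons_cons]
    rw [pv_LB ((n - 3).toNat) 1]
    have hz : ("(suc " ++ "zero" ++ " " ++ ("obj" ++ PySem.Int.toStr 1) ++ ")") = "(suc zero obj1)" := by decide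
    rw [hz]
    rfl

-- ===== VERDICT =====
theorem generate_suc_spec : Claim_equal_generate_suc := by
  intro n _ hpre
  unfold Spec_generate_suc
  exact pv_main n hpre
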